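-- pv_equiv track=rewrite | github.com/prak112/text-summarizer | test-run/gfg-testrun.py | sentence_score
-- ===== SOURCE A (Python) =====
-- def sentence_score(sentences, freqTable):
--     """
--     Args:
--     sentences - list of tokenized sentences
--     freq_tabl - dictionary of words with their frequency
--
--     Returns:
--     sentenceValue - dictionary of sentences with their frequency
--     """
--     # define dictionary
--     sentenceValue = {}
--
--     # assign sentence score based on words frequency
--     for sentence in sentences:
--         for word, freq in freqTable.items():
--             if word in sentence.lower():
--                 if sentence in sentenceValue:
--                     sentenceValue[sentence] += freq
--                 else:
--                     sentenceValue[sentence] = freq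
--
--     return sentenceValue
-- ===== SOURCE B (Python) =====
-- def sentence_score(sentences, freqTable):
--     # Count each distinct sentence once, then score each distinct sentence with a
--     # single scan of freqTable (lower() computed once per sentence), multiplying
--     # by the sentence's multiplicity instead of re-scoring duplicates.
--     counts = {}
--     for s in sentences:
--         counts[s] = counts.get(s, 0) + 1
--     result = {}
--     for s, c in counts.items():
--         low = s.lower()
--         hit = False
--         total = 0
--         for word, freq in freqTable.items():
--             if word in low:
--                 hit = True
--                 total += freq
--         if hit:
--             result[s] = c * total
--     return result
-- ===== Notes on version B (the rewrite author's own statement) =====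
-- stated objective: alternative
-- what changed: B replaces A's per-occurrence per-word dict mutation by counting each distinct sentence once, scoring it with a single scan of freqTable (lower() computed once per sentence instead of once per word), and multiplying the score by the sentence's multiplicity.
import Mathlib
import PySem

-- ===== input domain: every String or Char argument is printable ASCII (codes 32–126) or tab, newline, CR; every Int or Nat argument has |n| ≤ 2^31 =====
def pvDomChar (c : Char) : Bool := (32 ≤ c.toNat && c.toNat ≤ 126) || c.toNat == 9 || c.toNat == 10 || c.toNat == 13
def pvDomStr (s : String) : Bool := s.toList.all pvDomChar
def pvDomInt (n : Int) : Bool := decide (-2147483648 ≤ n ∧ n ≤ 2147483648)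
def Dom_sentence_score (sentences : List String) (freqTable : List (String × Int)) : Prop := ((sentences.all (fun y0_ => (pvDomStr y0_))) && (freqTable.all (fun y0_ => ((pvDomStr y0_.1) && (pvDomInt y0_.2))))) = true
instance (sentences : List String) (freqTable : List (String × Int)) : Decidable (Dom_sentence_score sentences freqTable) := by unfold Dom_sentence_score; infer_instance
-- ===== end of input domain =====

-- B counts each distinct sentence once and scores it with a single scan of freqTable
-- (lower() computed once per sentence), multiplying by the multiplicity, instead of
-- A's per-occurrence per-word dict mutation; same return value, different traversal.

-- ===== PORT A =====
def sentence_score (sentences : List String) (freqTable : List (String × Int)) : List (String × Int) :=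
  (sentences.foldl
    (fun sv sentence =>
      (PySem.Dict.ofList freqTable).items.foldl
        (fun sv wf =>
          if PySem.Str.isIn wf.1 (PySem.Str.lower sentence) then
            if sv.contains sentence then
              sv.insert sentence (sv.getD sentence 0 + wf.2)
            else
              sv.insert sentence wf.2
          else sv) sv)
    (PySem.Dict.empty : PySem.Dict String Int)).items

-- ===== PORT B =====
def sentence_score_alt (sentences : List String) (freqTable : List (String × Int)) : List (String × Int) :=
  -- counts[s] = counts.get(s, 0) + 1 loop
  let counts := sentences.foldl
    (fun (d : PySem.Dict String Int) s => d.insert s (d.getD s 0 + 1))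
    PySem.Dict.empty
  -- for s, c in counts.items(): one scan of freqTable per distinct sentence
  (counts.items.foldl
    (fun (result : PySem.Dict String Int) sc =>
      let low := PySem.Str.lower sc.1
      let ht := (PySem.Dict.ofList freqTable).items.foldl
        (fun (ht : Bool × Int) wf =>
          if PySem.Str.isIn wf.1 low then (true, ht.2 + wf.2) else ht)
        (false, 0)
      if ht.1 then result.insert sc.1 (sc.2 * ht.2) else result)
    PySem.Dict.empty).items

-- ===== PRECONDITION & SPEC =====
def Spec_sentence_score (sentences : List String) (freqTable : List (String × Int)) (out : List (String × Int)) : Prop := out = sentence_score_alt sentences freqTable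
instance (sentences : List String) (freqTable : List (String × Int)) (out : List (String × Int)) : Decidable (Spec_sentence_score sentences freqTable out) := by unfold Spec_sentence_score; infer_instance

-- ===== CLAIM (what is proved, stated in full; the proofs are below) =====
def Claim_equal_sentence_score : Prop := ∀ (sentences : List String) (freqTable : List (String × Int)), Dom_sentence_score sentences freqTable → Spec_sentence_score sentences freqTable (sentence_score sentences freqTable)

-- ===== LEMMAS AND PROOFS =====

-- L is the (deduplicated) item list of the frequency dict
def pvMatched (L : List (String × Int)) (s : String) : Bool :=
  L.any (fun wf => PySem.Str.isIn wf.1 (PySem.Str.lower s))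

def pvScore (L : List (String × Int)) (s : String) : Int :=
  ((L.filter (fun wf => PySem.Str.isIn wf.1 (PySem.Str.lower s))).map Prod.snd).sum

-- the common canonical result
def pvSpec (L : List (String × Int)) (l : List String) : List (String × Int) :=
  ((PySem.Set.ofList l).filter (fun s => pvMatched L s)).map
    (fun s => (s, (l.count s : Int) * pvScore L s))

lemma pvFoldl_ext {α β : Type} (f g : β → α → β) (h : ∀ b a, f b a = g b a) :
    ∀ (l : List α) (b : β), l.foldl f b = l.foldl g b := by
  intro l
  induction l with
  | nil => intro b; rfl
  | cons a l ih => intro b; simp only [List.foldl_cons, h]; exact ih _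

lemma pvScore_of_not_matched (L : List (String × Int)) (s : String)
    (h : pvMatched L s = false) : pvScore L s = 0 := by
  unfold pvScore
  have hfilter : L.filter (fun wf => PySem.Str.isIn wf.1 (PySem.Str.lower s)) = [] := by
    rw [List.filter_eq_nil_iff]
    intro a ha
    simp only [pvMatched, List.any_eq_false] at h
    exact h a ha
  rw [hfilter]
  rfl

lemma pvMatched_cons_pos (L : List (String × Int)) (wf : String × Int) (s : String)
    (h : PySem.Str.isIn wf.1 (PySem.Str.lower s) = true) :
    pvMatched (wf :: L) s = true := by
  simp only [pvMatched, List.any_cons, h, Bool.true_or]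

lemma pvMatched_cons_neg (L : List (String × Int)) (wf : String × Int) (s : String)
    (h : PySem.Str.isIn wf.1 (PySem.Str.lower s) = false) :
    pvMatched (wf :: L) s = pvMatched L s := by
  simp only [pvMatched, List.any_cons, h, Bool.false_or]

lemma pvScore_cons_pos (L : List (String × Int)) (wf : String × Int) (s : String)
    (h : PySem.Str.isIn wf.1 (PySem.Str.lower s) = true) :
    pvScore (wf :: L) s = wf.2 + pvScore L s := by
  simp only [pvScore, List.filter_cons, h, if_true, List.map_cons, List.sum_cons]

lemma pvScore_cons_neg (L : List (String × Int)) (wf : String × Int) (s : String)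
    (h : PySem.Str.isIn wf.1 (PySem.Str.lower s) = false) :
    pvScore (wf :: L) s = pvScore L s := by
  simp only [pvScore, List.filter_cons, h, Bool.false_eq_true, if_false]

lemma pvInnerA (L : List (String × Int)) (s : String) :
    ∀ (sv : PySem.Dict String Int),
      L.foldl
        (fun sv wf =>
          if PySem.Str.isIn wf.1 (PySem.Str.lower s) then
            if sv.contains s then
              sv.insert s (sv.getD s 0 + wf.2)
            else
              sv.insert s wf.2
          else sv) sv
      = if pvMatched L s then sv.insert s (sv.getD s 0 + pvScore L s) else sv := by
  induction L with
  | nil => intro sv; simp [pvMatched]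
  | cons wf L ih =>
    intro sv
    simp only [List.foldl_cons]
    by_cases h : PySem.Str.isIn wf.1 (PySem.Str.lower s) = true
    · have hstep : (if PySem.Str.isIn wf.1 (PySem.Str.lower s) = true then
          (if sv.contains s = true then sv.insert s (sv.getD s 0 + wf.2) else sv.insert s wf.2)
          else sv) = sv.insert s (sv.getD s 0 + wf.2) := by
        rw [if_pos h]
        by_cases hc : sv.contains s = true
        · rw [if_pos hc]
        · simp only [Bool.not_eq_true] at hc
          rw [if_neg (by simp [hc]), PySem.Dict.getD_of_not_contains sv 0 hc, zero_add]
      rw [hstep, ih]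
      rw [pvMatched_cons_pos L wf s h, pvScore_cons_pos L wf s h]
      by_cases hM : pvMatched L s = true
      · simp only [hM, if_true,
          PySem.Dict.getD_insert_self, PySem.Dict.insert_insert_self]
        ring_nf
      · simp only [Bool.not_eq_true] at hM
        simp only [hM, Bool.false_eq_true, if_false, if_true,
          pvScore_of_not_matched L s hM]
        ring_nf
    · simp only [Bool.not_eq_true] at h
      simp only [h, Bool.false_eq_true, if_false, ih,
        pvMatched_cons_neg L wf s h, pvScore_cons_neg L wf s h]

lemma pvOfList_append (l : List String) (s : String) :
    PySem.Set.ofList (l ++ [s]) = (PySem.Set.ofList l).add s := by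
  simp [PySem.Set.ofList, List.foldl_append]

lemma pvCount_append_ne (l : List String) (s s' : String) (h : s' ≠ s) :
    (l ++ [s]).count s' = l.count s' := by
  have hnm : s' ∉ [s] := by simp [h]
  rw [List.count_append, List.count_eq_zero_of_not_mem hnm, Nat.add_zero]

lemma pvA_eq (L : List (String × Int)) (l : List String) :
    (l.foldl
      (fun (sv : PySem.Dict String Int) s =>
        if pvMatched L s then sv.insert s (sv.getD s 0 + pvScore L s) else sv)
      PySem.Dict.empty).items = pvSpec L l := by
  induction l using List.reverseRecOn with
  | nil => simp [pvSpec, PySem.Set.ofList, PySem.Dict.empty]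
  | append_singleton l s ih =>
    rw [List.foldl_append]
    simp only [List.foldl_cons, List.foldl_nil]
    set F := l.foldl
      (fun (sv : PySem.Dict String Int) s =>
        if pvMatched L s then sv.insert s (sv.getD s 0 + pvScore L s) else sv)
      PySem.Dict.empty with hF
    set base := (PySem.Set.ofList l).filter (fun s => pvMatched L s) with hbase
    have hkeys : F.keys = base := by
      show F.items.map Prod.fst = base
      rw [ih]
      simp only [pvSpec, List.map_map, Function.comp_def]
      rw [show ((fun x => ((x, ((l.count x : Int)) * pvScore L x).1)) = fun (x : String) => x) from rfl,
        List.map_id']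
    have hnodupb : base.Nodup := (PySem.Set.nodup_ofList l).filter _
    have hnodupk : F.keys.Nodup := by rw [hkeys]; exact hnodupb
    have hmemb : ∀ s', s' ∈ base ↔ (s' ∈ l ∧ pvMatched L s' = true) := by
      intro s'
      rw [hbase, List.mem_filter, PySem.Set.mem_ofList]
    have hcont : F.contains s = decide (s ∈ base) := by
      rw [PySem.Dict.contains_eq_decide_mem_keys, hkeys]
    by_cases hm : pvMatched L s = true
    · -- s matched: A inserts/accumulates
      simp only [hm, if_true]
      by_cases hin : s ∈ l
      · -- existing key: in-place replacement
        have hsb : s ∈ base := (hmemb s).2 ⟨hin, hm⟩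
        have hc : F.contains s = true := by rw [hcont]; simp [hsb]
        have hitem : (s, ((l.count s : Int)) * pvScore L s) ∈ F.items := by
          rw [ih]
          exact List.mem_map.2 ⟨s, hsb, rfl⟩
        have hgetD : F.getD s 0 = ((l.count s : Int)) * pvScore L s :=
          PySem.Dict.getD_of_mem_items F hitem hnodupk 0
        rw [PySem.Dict.items_insert_of_contains F _ hc, ih, hgetD]
        have hofl : PySem.Set.ofList (l ++ [s]) = PySem.Set.ofList l := by
          rw [pvOfList_append, PySem.Set.add]
          have hcs : (PySem.Set.ofList l).contains s = true := by
            rw [PySem.Set.contains_iff, PySem.Set.mem_ofList]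
            exact hin
          rw [if_pos hcs]
        unfold pvSpec
        rw [hofl, List.map_map, ← hbase]
        apply List.map_congr_left
        intro s' hs'
        by_cases he : s' = s
        · subst he
          simp only [Function.comp_apply, beq_self_eq_true, if_true,
            Prod.mk.injEq, true_and]
          have hcnt : (l ++ [s']).count s' = l.count s' + 1 := by
            rw [List.count_append]
            simp
          rw [hcnt]
          push_cast
          ring
        · have hbeq : (s' == s) = false := by simp [he]
          simp only [Function.comp_apply, hbeq, Bool.false_eq_true, if_false]
          rw [pvCount_append_ne l s s' he]
      · -- fresh key: append
        have hsb : s ∉ base := fun h => hin ((hmemb s).1 h).1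
        have hc : F.contains s = false := by rw [hcont]; simp [hsb]
        rw [PySem.Dict.items_insert_of_not_contains F _ hc, ih,
          PySem.Dict.getD_of_not_contains F 0 hc]
        have hofl : PySem.Set.ofList (l ++ [s]) = PySem.Set.ofList l ++ [s] := by
          rw [pvOfList_append, PySem.Set.add]
          have hcs : (PySem.Set.ofList l).contains s = false := by
            rw [← Bool.not_eq_true, PySem.Set.contains_iff, PySem.Set.mem_ofList]
            exact hin
          rw [if_neg (by rw [hcs]; exact Bool.false_ne_true)]
        unfold pvSpec
        rw [hofl, List.filter_append, List.map_append, ← hbase]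
        have h1 : ((PySem.Set.ofList l).filter (fun s => pvMatched L s)) = base := rfl
        congr 1
        · apply List.map_congr_left
          intro s' hs'
          have hne : s' ≠ s := fun he => hin (he ▸ ((hmemb s').1 hs').1)
          rw [pvCount_append_ne l s s' hne]
        · simp only [List.filter_cons, hm, if_true, List.filter_nil, List.map_cons,
            List.map_nil]
          have : (l ++ [s]).count s = 1 := by
            rw [List.count_append, List.count_eq_zero_of_not_mem hin]
            simp
          rw [this]
          norm_num
    · -- s not matched: nothing changes
      simp only [Bool.not_eq_true] at hm
      simp only [hm, Bool.false_eq_true, if_false]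
      rw [ih]
      have hfilt : ((PySem.Set.ofList (l ++ [s])).filter (fun s => pvMatched L s)) = base := by
        rw [pvOfList_append, PySem.Set.add]
        by_cases hc : (PySem.Set.ofList l).contains s = true
        · rw [if_pos hc, hbase]
        · rw [if_neg hc, List.filter_append, hbase]
          simp [hm]
      unfold pvSpec
      rw [hfilt]
      apply List.map_congr_left
      intro s' hs'
      have hne : s' ≠ s := by
        intro he
        have := ((hmemb s').1 hs').2
        rw [he, hm] at this
        exact Bool.false_ne_true this
      rw [pvCount_append_ne l s s' hne]

lemma pvInnerB (L : List (String × Int)) (s : String) :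
    ∀ (b : Bool) (t : Int),
      L.foldl
        (fun (ht : Bool × Int) wf =>
          if PySem.Str.isIn wf.1 (PySem.Str.lower s) then (true, ht.2 + wf.2) else ht)
        (b, t)
      = (b || pvMatched L s, t + pvScore L s) := by
  induction L with
  | nil => intro b t; simp [pvMatched, pvScore]
  | cons wf L ih =>
    intro b t
    simp only [List.foldl_cons]
    by_cases h : PySem.Str.isIn wf.1 (PySem.Str.lower s) = true
    · simp only [h, if_true, ih]
      rw [pvMatched_cons_pos L wf s h, pvScore_cons_pos L wf s h]
      simp [add_assoc]
    · simp only [Bool.not_eq_true] at h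
      simp only [h, Bool.false_eq_true, if_false, ih]
      rw [pvMatched_cons_neg L wf s h, pvScore_cons_neg L wf s h]

lemma pvB_fold (L : List (String × Int)) (ft : List (String × Int)) :
    ft.foldl
      (fun (result : PySem.Dict String Int) sc =>
        if pvMatched L sc.1 then result.insert sc.1 (sc.2 * pvScore L sc.1) else result)
      PySem.Dict.empty
    = (ft.filter (fun sc => pvMatched L sc.1)).foldl
        (fun (result : PySem.Dict String Int) sc => result.insert sc.1 (sc.2 * pvScore L sc.1))
        PySem.Dict.empty := by
  suffices h : ∀ (d : PySem.Dict String Int),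
      ft.foldl
        (fun result sc =>
          if pvMatched L sc.1 then result.insert sc.1 (sc.2 * pvScore L sc.1) else result) d
      = (ft.filter (fun sc => pvMatched L sc.1)).foldl
          (fun result sc => result.insert sc.1 (sc.2 * pvScore L sc.1)) d from h _
  induction ft with
  | nil => intro d; rfl
  | cons sc ft ih =>
    intro d
    by_cases h : pvMatched L sc.1 = true
    · simp only [List.foldl_cons, List.filter_cons, h, if_true, ih]
    · simp only [Bool.not_eq_true] at h
      simp only [List.foldl_cons, List.filter_cons, h, Bool.false_eq_true, if_false, ih]

lemma pvB_eq (l : List String) (freqTable : List (String × Int)) :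
    sentence_score_alt l freqTable
      = pvSpec ((PySem.Dict.ofList freqTable).items) l := by
  unfold sentence_score_alt
  set L := (PySem.Dict.ofList freqTable).items with hL
  have hcounter : l.foldl
      (fun (d : PySem.Dict String Int) s => d.insert s (d.getD s 0 + 1))
      PySem.Dict.empty = PySem.Dict.counter l := rfl
  have hstep : ∀ (result : PySem.Dict String Int) (sc : String × Int),
      (let low := PySem.Str.lower sc.1
       let ht := L.foldl
         (fun (ht : Bool × Int) wf =>
           if PySem.Str.isIn wf.1 low then (true, ht.2 + wf.2) else ht)
         (false, 0)
       if ht.1 then result.insert sc.1 (sc.2 * ht.2) else result)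
      = if pvMatched L sc.1 then result.insert sc.1 (sc.2 * pvScore L sc.1)
        else result := by
    intro result sc
    simp only [pvInnerB L sc.1 false 0, Bool.false_or, zero_add]
  simp only [hstep, hcounter]
  rw [pvB_fold L (PySem.Dict.counter l).items]
  rw [PySem.Dict.items_counter, List.filter_map, List.foldl_map]
  have hfresh := PySem.Dict.items_foldl_insert_fresh
    (((PySem.Set.ofList l).filter (fun k => pvMatched L k)))
    (fun (a : String) => a)
    (fun (a : String) => ((l.count a : Int)) * pvScore L a)
    (PySem.Dict.empty : PySem.Dict String Int)
    (fun a _ => PySem.Dict.contains_empty a)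
    (by simpa using ((PySem.Set.nodup_ofList l).filter (fun k => pvMatched L k)))
  convert hfresh using 2

theorem sentence_score_spec : Claim_equal_sentence_score := by
  unfold Claim_equal_sentence_score
  intro sentences freqTable _
  unfold Spec_sentence_score sentence_score
  set L := (PySem.Dict.ofList freqTable).items with hL
  rw [pvB_eq]
  rw [pvFoldl_ext _ _ (fun sv s => pvInnerA L s sv) sentences PySem.Dict.empty]
  exact pvA_eq L sentences
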